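-- pv_equiv track=rewrite | github.com/Shirakawa42/GodBot | GodBot.py | check_and_between_words
-- ===== SOURCE A (Python) =====
-- def check_and_between_words(words, authorized_list):
-- 	for word, i in zip(words, range(len(words))):
-- 		if word in authorized_list and i % 2 == 0:
-- 			pass
-- 		elif word == '&' and i % 2 == 1 and i < len(words)-1:
-- 			pass
-- 		else:
-- 			return []
-- 	return list(filter(lambda a: a != '&', words))
-- ===== SOURCE B (Python) =====
-- def check_and_between_words(words, authorized_list):
--     def ok(ws):
--         if len(ws) == 1:
--             return ws[0] in authorized_list
--         return len(ws) >= 3 and ws[0] in authorized_list and ws[1] == '&' and ok(ws[2:])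
--     return [w for w in words if w != '&'] if ok(words) else []
-- ===== Notes on version B (the rewrite author's own statement) =====
-- stated objective: simpler
-- what changed: Replaces the index-counting loop with parity tests and an i<len-1 guard by a grammar-style recursion consuming word/'&' pairs two at a time, then a single '&'-filter of the whole list.
import Mathlib
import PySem

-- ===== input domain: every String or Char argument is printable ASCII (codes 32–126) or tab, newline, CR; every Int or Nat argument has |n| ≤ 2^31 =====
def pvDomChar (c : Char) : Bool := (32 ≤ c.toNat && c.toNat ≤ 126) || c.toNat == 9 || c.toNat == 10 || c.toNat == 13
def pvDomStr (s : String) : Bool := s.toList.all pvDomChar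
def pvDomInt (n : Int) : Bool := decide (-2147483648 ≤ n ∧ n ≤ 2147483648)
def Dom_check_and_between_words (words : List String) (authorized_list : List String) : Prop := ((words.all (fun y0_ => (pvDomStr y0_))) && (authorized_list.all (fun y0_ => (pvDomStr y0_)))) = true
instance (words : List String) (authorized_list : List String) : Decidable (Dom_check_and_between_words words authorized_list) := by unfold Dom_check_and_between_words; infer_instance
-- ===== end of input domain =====

-- B replaces A's index-parity loop with a grammar-style recursion consuming word/'&' pairs (objective: simpler).

-- ===== PORT A =====
-- A's for-loop over zip(words, range(len(words))) with early 'return []'; n is len(words).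
def caLoop (authorized_list : List String) (n : Nat) : List String → Nat → Bool
  | [], _ => true
  | w :: rest, i =>
    if authorized_list.contains w && i % 2 == 0 then caLoop authorized_list n rest (i + 1)
    else if w == "&" && i % 2 == 1 && decide (i < n - 1) then caLoop authorized_list n rest (i + 1)
    else false

def check_and_between_words (words : List String) (authorized_list : List String) : List String :=
  if caLoop authorized_list words.length words 0 then words.filter (fun a => a != "&") else []

-- ===== PORT B =====
-- B's helper ok(ws): a single word, or word, '&', then a valid shorter tail (len >= 3).
def cbOk (authorized_list : List String) : List String → Bool
  | [w] => authorized_list.contains w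
  | w :: amp :: rest :: rests =>
      authorized_list.contains w && amp == "&" && cbOk authorized_list (rest :: rests)
  | _ => false

def check_and_between_words_alt (words : List String) (authorized_list : List String) : List String :=
  if cbOk authorized_list words then words.filter (fun a => a != "&") else []

-- ===== PRECONDITION & SPEC =====
def Spec_check_and_between_words (words : List String) (authorized_list : List String) (out : List String) : Prop := out = check_and_between_words_alt words authorized_list
instance (words : List String) (authorized_list : List String) (out : List String) : Decidable (Spec_check_and_between_words words authorized_list out) := by unfold Spec_check_and_between_words; infer_instance

-- ===== CLAIM (what is proved, stated in full; the proofs are below) =====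
def Claim_equal_check_and_between_words : Prop := ∀ (words : List String) (authorized_list : List String), Dom_check_and_between_words words authorized_list → Spec_check_and_between_words words authorized_list (check_and_between_words words authorized_list)

-- ===== LEMMAS AND PROOFS =====

-- At an even index i with i + ws.length = n, A's loop accepts exactly when ws is empty
-- (loop finished) or B's grammar check accepts ws.
theorem caLoop_eq_cbOk (auth : List String) (ws : List String) : ∀ (i : Nat),
    i % 2 = 0 → caLoop auth (i + ws.length) ws i = (ws.isEmpty || cbOk auth ws) := by
  induction ws using cbOk.induct with
  | case1 w =>
      intro i hi
      simp [caLoop, cbOk, hi]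
  | case2 w amp rest rests ih =>
      intro i hi
      have h1 : (i + 1) % 2 = 1 := by omega
      have hlen : i + (w :: amp :: rest :: rests).length = (i + 2) + (rest :: rests).length := by
        simp; omega
      have hlt : i + 1 < ((i + 2) + (rest :: rests).length) - 1 := by simp; omega
      rw [hlen]
      have key := ih (i + 2) (by omega)
      by_cases hw : w ∈ auth
      · by_cases ha : amp = "&"
        · simp only [caLoop, cbOk, hi, h1, ha, hlt] at key ⊢
          simp_all [show i + 1 + 1 = i + 2 from rfl]
        · simp [caLoop, cbOk, hi, h1, hw, ha]
      · simp [caLoop, cbOk, hi, hw]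
  | case3 ws h1 h2 =>
      intro i hi
      match ws with
      | [] => simp [caLoop, cbOk]
      | [w] => exact absurd rfl (h1 w)
      | [w, amp] =>
          have h1' : (i + 1) % 2 = 1 := by omega
          simp [caLoop, cbOk, hi, h1']
      | w :: amp :: r :: rs => exact absurd rfl (h2 w amp r rs)

-- ===== VERDICT (by name: the statement is the Claim_ definition above) =====
theorem check_and_between_words_spec : Claim_equal_check_and_between_words := by
  intro words auth _
  unfold Spec_check_and_between_words check_and_between_words check_and_between_words_alt
  cases words with
  | nil => simp [caLoop, cbOk]
  | cons w ws =>
      have := caLoop_eq_cbOk auth (w :: ws) 0 (by omega)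
      simp only [Nat.zero_add] at this
      rw [this]
      simp
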